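-- pv_equiv track=rewrite | github.com/aszkiel71/uwr | informatyka [computer science]/[24-W] Wstep do pythona/tenth_list/task5.py | all_partitions
-- ===== SOURCE A (Python) =====
-- def all_partitions(elements):
--     """generowanie wszystkich mozliwych podzbiorow"""
--
--     if not elements:
--         return [[]]
--
--     element = elements[0]
--     rest = elements[1:]
--
--     partitions_of_rest = all_partitions(rest)
--     result = []
--
--     for partition in partitions_of_rest:
--         #dodajemy element do juz istniejeacego podzbioru
--         for i in range(len(partition)):
--             new_partition = partition[:]
--             new_partition[i] = new_partition[i] | {element}
--             result.append(new_partition)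
--         #dodajemy element jako nowy podzbior
--         result.append(partition + [{element}])
--
--     return result
-- ===== SOURCE B (Python) =====
-- def all_partitions(elements):
--     # Iterative rebuild: start from the single empty partition and fold the
--     # elements in reversed order (matching A's recursion, whose deepest call
--     # handles the last element first). Each step rewrites the partition list
--     # with comprehensions instead of copy-and-assign.
--     partitions = [[]]
--     for x in reversed(elements):
--         partitions = [
--             q
--             for p in partitions
--             for q in [p[:i] + [p[i] | {x}] + p[i + 1:] for i in range(len(p))]
--                      + [p + [{x}]]
--         ]
--     return partitions
-- ===== Notes on version B (the rewrite author's own statement) =====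
-- stated objective: alternative
-- what changed: Replaces A's head-first recursion with an iterative fold over the reversed element list that rebuilds the partition list via nested comprehensions, splicing the updated subset with slices instead of copy-and-index-assign.
import Mathlib
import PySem

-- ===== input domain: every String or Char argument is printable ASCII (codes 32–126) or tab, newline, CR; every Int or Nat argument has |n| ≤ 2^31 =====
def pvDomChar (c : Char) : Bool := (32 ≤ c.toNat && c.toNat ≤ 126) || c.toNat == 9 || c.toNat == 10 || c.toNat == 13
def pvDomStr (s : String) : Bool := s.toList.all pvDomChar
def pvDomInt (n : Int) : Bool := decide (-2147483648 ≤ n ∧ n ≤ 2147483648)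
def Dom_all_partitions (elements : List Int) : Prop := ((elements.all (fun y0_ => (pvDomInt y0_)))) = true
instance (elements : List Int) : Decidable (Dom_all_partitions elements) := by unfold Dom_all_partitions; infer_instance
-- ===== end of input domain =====

-- B replaces A's recursion by an iterative fold over the reversed elements that
-- rebuilds the partition list with comprehensions (slice-splice instead of
-- copy-and-assign); objective: alternative decomposition, same cost.

-- ===== PORT A =====
-- recursion on the head element; inner loop appends to 'result' one partition
-- per existing subset (copy with subset i replaced by its union with {element}),
-- then the partition extended with the new singleton {element}.
-- partition[i] is ported as getD i [] (i ranges over range(len(partition)), so in range).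
def all_partitions (elements : List Int) : List (List (List Int)) :=
  match elements with
  | [] => [[]]
  | element :: rest =>
    (all_partitions rest).foldl (fun result partition =>
      ((List.range partition.length).foldl (fun result i =>
        result ++ [partition.set i (PySem.Set.union (partition.getD i []) [element])]) result)
      ++ [partition ++ [[element]]]) []

-- ===== PORT B =====
-- p[:i] = take i and p[i+1:] = drop (i+1): exact, since 0 ≤ i < len(p) in the comprehension.
def all_partitions_alt (elements : List Int) : List (List (List Int)) :=
  elements.reverse.foldl (fun partitions x =>
    partitions.flatMap (fun p =>
      ((List.range p.length).map (fun i =>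
        p.take i ++ [PySem.Set.union (p.getD i []) [x]] ++ p.drop (i + 1)))
      ++ [p ++ [[x]]])) [[]]

-- ===== PRECONDITION & SPEC =====
def Spec_all_partitions (elements : List Int) (out : List (List (List Int))) : Prop := out = all_partitions_alt elements
instance (elements : List Int) (out : List (List (List Int))) : Decidable (Spec_all_partitions elements out) := by unfold Spec_all_partitions; infer_instance

-- ===== CLAIM (what is proved, stated in full; the proofs are below) =====
def Claim_equal_all_partitions : Prop := ∀ (elements : List Int), Dom_all_partitions elements → Spec_all_partitions elements (all_partitions elements)

-- ===== LEMMAS AND PROOFS =====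

-- B's one-element step, named for the proofs below.
def apStep (parts : List (List (List Int))) (x : Int) : List (List (List Int)) :=
  parts.flatMap (fun p =>
    ((List.range p.length).map (fun i =>
      p.take i ++ [PySem.Set.union (p.getD i []) [x]] ++ p.drop (i + 1)))
    ++ [p ++ [[x]]])

theorem apStep_inner (partition : List (List Int)) (element : Int)
    (acc : List (List (List Int))) :
    (List.range partition.length).foldl (fun result i =>
        result ++ [partition.set i (PySem.Set.union (partition.getD i []) [element])]) acc
      = acc ++ (List.range partition.length).map (fun i =>
          partition.take i ++ [PySem.Set.union (partition.getD i []) [element]]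
            ++ partition.drop (i + 1)) := by
  rw [PySem.List.foldl_append_singleton_eq_map]
  congr 1
  apply List.map_congr_left
  intro i hi
  have hlt : i < partition.length := List.mem_range.mp hi
  rw [List.set_eq_take_append_cons_drop, if_pos hlt]
  simp

theorem all_partitions_foldr (elements : List Int) :
    all_partitions elements = elements.foldr (fun x parts => apStep parts x) [[]] := by
  induction elements with
  | nil => rfl
  | cons e rest ih =>
    rw [all_partitions, ih, List.foldr_cons]
    generalize rest.foldr (fun x parts => apStep parts x) [[]] = parts
    rw [apStep]
    rw [← List.nil_append (parts.flatMap _)]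
    rw [← PySem.List.foldl_append_eq_flatMap]
    apply PySem.List.foldl_congr_mem
    intro acc p _
    rw [apStep_inner]
    simp

theorem all_partitions_alt_foldr (elements : List Int) :
    all_partitions_alt elements = elements.foldr (fun x parts => apStep parts x) [[]] := by
  rw [all_partitions_alt, List.foldl_reverse]
  rfl

-- ===== VERDICT (by name: the statement is the Claim_ definition above) =====
theorem all_partitions_spec : Claim_equal_all_partitions := by
  intro elements _
  unfold Spec_all_partitions
  rw [all_partitions_foldr, all_partitions_alt_foldr]
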